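-- pv_equiv track=rewrite | github.com/ThiagoRocha1/Listas-Comp1 | lista5thiagorocha.py | questao4
-- ===== SOURCE A (Python) =====
-- def questao4 (lista):
--
--     soma_pares  = 0
--     soma_impares = 0
--
--
--     for i in range(len(lista)):
--         if i%2 == 0:
--             soma_pares += lista[i]
--         else:
--             soma_impares+= lista[i]
--
--
--     return soma_impares - soma_pares
-- ===== SOURCE B (Python) =====
-- def questao4(lista):
--     return sum(lista[1::2]) - sum(lista[0::2])
-- ===== Notes on version B (the rewrite author's own statement) =====
-- stated objective: simpler
-- what changed: Replaces the indexed loop with a modulo parity branch by two strided slices: sum(lista[1::2]) - sum(lista[0::2]).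
import Mathlib
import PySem

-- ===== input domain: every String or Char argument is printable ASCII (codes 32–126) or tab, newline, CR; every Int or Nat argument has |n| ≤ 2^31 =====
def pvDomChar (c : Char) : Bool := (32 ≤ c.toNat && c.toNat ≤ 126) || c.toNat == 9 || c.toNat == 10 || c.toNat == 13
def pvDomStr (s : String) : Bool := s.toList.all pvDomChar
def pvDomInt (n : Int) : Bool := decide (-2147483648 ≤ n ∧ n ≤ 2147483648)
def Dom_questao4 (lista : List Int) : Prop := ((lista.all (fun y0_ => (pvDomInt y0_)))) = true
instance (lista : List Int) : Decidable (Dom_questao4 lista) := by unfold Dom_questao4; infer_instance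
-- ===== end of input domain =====

-- B replaces the single indexed loop with a modulo parity test by two strided slices summed separately (simpler).


-- ===== PORT A =====
def questao4 (lista : List Int) : Int :=
  let r := (PySem.List.pyRange 0 (lista.length : Int) 1).foldl
    (fun acc i =>
      if PySem.Int.mod i 2 = 0 then (acc.1 + PySem.List.pyGetD lista i 0, acc.2)
      else (acc.1, acc.2 + PySem.List.pyGetD lista i 0)) (0, 0)
  r.2 - r.1

-- ===== PORT B =====
-- hand port of the positive-step slice l[::2] (every second element, starting at the head);
-- exact for step 2 with no bounds. lista[1::2] is then pickEvery2 lista.tail.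
def pickEvery2 : List Int → List Int
  | [] => []
  | [x] => [x]
  | x :: _ :: xs => x :: pickEvery2 xs

def questao4_alt (lista : List Int) : Int :=
  (pickEvery2 lista.tail).sum - (pickEvery2 lista).sum

-- ===== PRECONDITION & SPEC =====
def Spec_questao4 (lista : List Int) (out : Int) : Prop := out = questao4_alt lista
instance (lista : List Int) (out : Int) : Decidable (Spec_questao4 lista out) := by unfold Spec_questao4; infer_instance

-- ===== CLAIM (what is proved, stated in full; the proofs are below) =====
def Claim_equal_questao4 : Prop := ∀ (lista : List Int), Dom_questao4 lista → Spec_questao4 lista (questao4 lista)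

-- ===== LEMMAS AND PROOFS =====

theorem pickEvery2_cons (a : Int) (t : List Int) :
    pickEvery2 (a :: t) = a :: pickEvery2 t.tail := by
  cases t <;> simp [pickEvery2]

theorem questao4_key (xs : List Int) : ∀ (l : List Int) (k : Nat), k % 2 = 0 → l.drop k = xs →
    ∀ sp si : Int,
    (PySem.List.pyRange (k : Int) (l.length : Int) 1).foldl
      (fun acc i =>
        if PySem.Int.mod i 2 = 0 then (acc.1 + PySem.List.pyGetD l i 0, acc.2)
        else (acc.1, acc.2 + PySem.List.pyGetD l i 0)) (sp, si)
    = (sp + (pickEvery2 xs).sum, si + (pickEvery2 xs.tail).sum) := by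
  induction xs using pickEvery2.induct with
  | case1 =>
    intro l k _ h sp si
    have hk : l.length ≤ k := by
      by_contra hlt
      have : l.drop k ≠ [] := by simp [List.drop_eq_nil_iff]; omega
      exact this h
    rw [PySem.List.pyRange_one_eq_nil (by exact_mod_cast hk)]
    simp [pickEvery2]
  | case2 x =>
    intro l k hke h sp si
    have hlen : l.length = k + 1 := by
      have := congrArg List.length h
      simp at this; omega
    have hk : (k : Int) < (l.length : Int) := by exact_mod_cast (by omega : k < l.length)
    rw [PySem.List.pyRange_one_cons hk]
    have hnil : PySem.List.pyRange ((k : Int) + 1) (l.length : Int) 1 = [] :=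
      PySem.List.pyRange_one_eq_nil (by exact_mod_cast (by omega : l.length ≤ k + 1))
    have hx : l[k]'(by omega) = x := by
      have : (l.drop k)[0]'(by simp [h]) = x := by simp [h]
      simpa using this
    have hdvd : (2 : Int) ∣ (k : Int) := by omega
    simp [hnil, PySem.List.pyGetD_natCast, hdvd, pickEvery2,
      List.getElem?_eq_getElem (show k < l.length by omega), hx]
  | case3 x y ys ih =>
    intro l k hke h sp si
    have hlen : l.length = k + (ys.length + 2) := by
      have := congrArg List.length h
      simp at this; omega
    have hk : (k : Int) < (l.length : Int) := by exact_mod_cast (by omega : k < l.length)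
    have hk1 : ((k : Int) + 1) < (l.length : Int) := by
      exact_mod_cast (by omega : ((k + 1 : Nat) : Int) < (l.length : Int))
    rw [PySem.List.pyRange_one_cons hk, List.foldl_cons,
        PySem.List.pyRange_one_cons hk1, List.foldl_cons]
    have hx : l[k]'(by omega) = x := by
      have : (l.drop k)[0]'(by simp [h]) = x := by simp [h]
      simpa using this
    have hy : l[k + 1]'(by omega) = y := by
      have : (l.drop k)[1]'(by simp [h]) = y := by simp [h]
      simpa using this
    have hdrop2 : l.drop (k + 2) = ys := by
      have : (l.drop k).drop 2 = ys := by simp [h]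
      simpa [List.drop_drop, Nat.add_comm] using this
    have hm0 : PySem.Int.mod (k : Int) 2 = 0 := by
      rw [PySem.Int.mod_eq_emod_of_pos (by omega : (0:Int) < 2)]; omega
    have hm1 : PySem.Int.mod ((k : Int) + 1) 2 ≠ 0 := by
      rw [PySem.Int.mod_eq_emod_of_pos (by omega : (0:Int) < 2)]; omega
    have hg1 : PySem.List.pyGetD l ((k : Int)) 0 = x := by
      rw [PySem.List.pyGetD_natCast]
      simp [List.getD, List.getElem?_eq_getElem (by omega : k < l.length), hx]
    have hg2 : PySem.List.pyGetD l ((k : Int) + 1) 0 = y := by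
      have : ((k : Int) + 1) = ((k + 1 : Nat) : Int) := by push_cast; ring
      rw [this, PySem.List.pyGetD_natCast]
      simp [List.getD, List.getElem?_eq_getElem (by omega : k + 1 < l.length), hy]
    simp only [hm0, hm1, hg1, hg2]
    have ihres := ih l (k + 2) (by omega) hdrop2 (sp + x) (si + y)
    have hcast : ((k + 2 : Nat) : Int) = (k : Int) + 1 + 1 := by push_cast; ring
    rw [hcast] at ihres
    have hinit : (if False then (sp + x + y, si)
        else ((((sp + x, si) : Int × Int)).1, (((sp + x, si) : Int × Int)).2 + y)) = ((sp + x, si + y) : Int × Int) := by simp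
    simp only [if_true]
    rw [hinit, ihres]
    simp [pickEvery2, pickEvery2_cons, add_assoc]

theorem questao4_spec : Claim_equal_questao4 := by
  intro lista _
  unfold Spec_questao4 questao4 questao4_alt
  have h := questao4_key lista lista 0 (by omega) (by simp) 0 0
  simp only [Nat.cast_zero] at h
  rw [h]
  simp
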